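-- pv_equiv track=rewrite | github.com/danfrankj/accountabot | cloud_functions/send_tracking_email/main.py | compute_streak
-- ===== SOURCE A (Python) =====
-- def compute_streak(goal):
--     streak = 0
--     for opportunity in sorted(goal.get('opportunities', []), reverse=True):
--         if opportunity in goal.get('completions', []):
--             streak += 1
--         else:
--             break
--     return streak
-- ===== SOURCE B (Python) =====
-- def compute_streak(goal):
--     completions = set(goal.get('completions', []))
--     streak = 0
--     for opportunity in sorted(goal.get('opportunities', [])):
--         streak = streak + 1 if opportunity in completions else 0
--     return streak
-- ===== Notes on version B (the rewrite author's own statement) =====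
-- stated objective: alternative
-- what changed: B sorts opportunities ascending and makes one full pass with a reset-to-zero counter over a prebuilt completions set, instead of A's descending sort with an early-break leading-run scan that re-reads the completions list each iteration.
import Mathlib
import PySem

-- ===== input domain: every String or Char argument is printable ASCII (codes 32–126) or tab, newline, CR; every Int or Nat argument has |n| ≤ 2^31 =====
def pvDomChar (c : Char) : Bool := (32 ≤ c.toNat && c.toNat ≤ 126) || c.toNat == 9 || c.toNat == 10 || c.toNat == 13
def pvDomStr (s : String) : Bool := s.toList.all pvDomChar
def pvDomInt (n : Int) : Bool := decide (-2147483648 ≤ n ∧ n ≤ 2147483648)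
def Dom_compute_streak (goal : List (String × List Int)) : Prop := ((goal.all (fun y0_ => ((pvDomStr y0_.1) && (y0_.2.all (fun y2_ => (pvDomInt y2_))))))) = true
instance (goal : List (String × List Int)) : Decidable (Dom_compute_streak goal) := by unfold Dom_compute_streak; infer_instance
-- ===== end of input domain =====

-- B sorts ascending and makes one full pass with a reset-to-zero counter over a
-- prebuilt completions set, instead of A's descending early-break scan (alternative decomposition).


-- ===== PORT A =====
-- dict.get(k, default) on the association-list dict = first-match lookup with default
-- the for-loop with break: takes the remaining descending-sorted opportunities and the accumulator
def csLoopA (goal : List (String × List Int)) : List Int → Int → Int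
  | [], streak => streak
  | o :: rest, streak =>
      if ((goal.lookup "completions").getD []).contains o then
        csLoopA goal rest (streak + 1)
      else streak

def compute_streak (goal : List (String × List Int)) : Int :=
  csLoopA goal (PySem.List.sorted ((goal.lookup "opportunities").getD []) (fun x => x) true) 0

-- ===== PORT B =====
def compute_streak_alt (goal : List (String × List Int)) : Int :=
  let completions := PySem.Set.ofList ((goal.lookup "completions").getD [])
  (PySem.List.sorted ((goal.lookup "opportunities").getD []) (fun x => x)).foldl
    (fun streak o => if completions.contains o then streak + 1 else 0) 0

-- ===== PRECONDITION & SPEC =====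
def Spec_compute_streak (goal : List (String × List Int)) (out : Int) : Prop := out = compute_streak_alt goal
instance (goal : List (String × List Int)) (out : Int) : Decidable (Spec_compute_streak goal out) := by unfold Spec_compute_streak; infer_instance

-- ===== CLAIM (what is proved, stated in full; the proofs are below) =====
def Claim_equal_compute_streak : Prop := ∀ (goal : List (String × List Int)), Dom_compute_streak goal → Spec_compute_streak goal (compute_streak goal)

-- ===== LEMMAS AND PROOFS =====

-- sorting Ints (identity key) descending is the reverse of sorting ascending
theorem sorted_rev_eq_reverse_sorted (xs : List Int) :
    PySem.List.sorted xs (fun x => x) true = (PySem.List.sorted xs (fun x => x)).reverse := by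
  apply List.eq_of_perm_of_sorted (le := fun a b => b ≤ a)
  · intro a b _ _ h1 h2; omega
  · exact PySem.List.sorted_pairwise_rev xs (fun x => x)
  · exact List.pairwise_reverse.mpr (PySem.List.sorted_pairwise xs (fun x => x))
  · exact ((PySem.List.sorted_perm xs (fun x => x) true).trans
      ((PySem.List.sorted_perm xs (fun x => x) false).symm)).trans
      (List.reverse_perm _).symm

-- A's break loop equals accumulator plus a foldr that computes the leading run
theorem csLoopA_eq_foldr (goal : List (String × List Int)) (l : List Int) (s : Int) :
    csLoopA goal l s = s + l.foldr
      (fun o c => if ((goal.lookup "completions").getD []).contains o then c + 1 else 0) 0 := by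
  induction l generalizing s with
  | nil => simp [csLoopA]
  | cons o rest ih =>
      simp only [csLoopA, List.foldr]
      split_ifs with h
      · rw [ih]; ring
      · ring

-- membership in the completions set agrees with membership in the completions list
theorem contains_ofList (xs : List Int) (o : Int) :
    (PySem.Set.ofList xs).contains o = xs.contains o := by
  simp [List.contains_eq_mem, PySem.Set.mem_ofList]

-- ===== VERDICT (by name: the statement is the Claim_ definition above) =====
theorem compute_streak_spec : Claim_equal_compute_streak := by
  intro goal _
  unfold Spec_compute_streak compute_streak compute_streak_alt
  rw [sorted_rev_eq_reverse_sorted, csLoopA_eq_foldr, zero_add, List.foldr_reverse]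
  simp only [contains_ofList]
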